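-- pv_equiv track=rewrite | github.com/ylee0908/Algorithm.py | is_permutation.py | is_permutation_one
-- ===== SOURCE A (Python) =====
-- def is_permutation_one(str_1, str_2):
-- 	str_1 = str_1.lower().replace(" ", "")
-- 	str_2 = str_2.lower().replace(" ", "")
--
-- 	if len(str_1) != len(str_2):
-- 		return False
--
-- 	str_1 = sorted(str_1)
-- 	str_2 = sorted(str_2)
--
-- 	for i in range(len(str_1)):
-- 		if str_1[i] != str_2[i]:
-- 			return False
-- 	return True
-- ===== SOURCE B (Python) =====
-- def is_permutation_one(str_1, str_2):
-- 	counts = {}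
-- 	for ch in str_1.lower():
-- 		if ch != ' ':
-- 			counts[ch] = counts.get(ch, 0) + 1
-- 	for ch in str_2.lower():
-- 		if ch != ' ':
-- 			counts[ch] = counts.get(ch, 0) - 1
-- 	return all(v == 0 for v in counts.values())
-- ===== Notes on version B (the rewrite author's own statement) =====
-- stated objective: faster
-- what changed: B drops A's replace/length-guard/sort-both/compare pipeline entirely: one signed frequency dict is built in a single pass over each lowered string (+1 for str_1's non-space chars, -1 for str_2's), and the answer is whether every count is zero.
import Mathlib
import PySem

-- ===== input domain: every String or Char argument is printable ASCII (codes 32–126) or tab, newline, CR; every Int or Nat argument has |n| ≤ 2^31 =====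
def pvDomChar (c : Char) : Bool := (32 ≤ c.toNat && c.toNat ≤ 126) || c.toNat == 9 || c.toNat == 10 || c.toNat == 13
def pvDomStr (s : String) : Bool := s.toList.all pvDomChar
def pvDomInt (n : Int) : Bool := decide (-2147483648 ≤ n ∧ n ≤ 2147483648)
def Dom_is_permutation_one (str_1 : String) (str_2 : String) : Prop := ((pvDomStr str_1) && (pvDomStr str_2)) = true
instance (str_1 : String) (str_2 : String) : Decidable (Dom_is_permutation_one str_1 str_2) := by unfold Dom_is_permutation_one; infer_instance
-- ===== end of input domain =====

-- B replaces A's normalize/length-guard/sort-both/compare pipeline with a single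
-- signed frequency dict (+1 per non-space char of lower(str_1), -1 per non-space
-- char of lower(str_2)) checked to be all zero: an alternative algorithm.


-- ===== PORT A =====
-- 'for i in range(len(str_1)): if str_1[i] != str_2[i]: return False' on two
-- equal-length char lists, element by element in order with early exit
def pvCmpLoop : List Char → List Char → Bool
  | [], _ => true
  | _, [] => true
  | a :: as, b :: bs => if a ≠ b then false else pvCmpLoop as bs

def is_permutation_one (str_1 : String) (str_2 : String) : Bool :=
  let s1 := PySem.Chars.replace (PySem.Chars.lower str_1.toList) [' '] []
  let s2 := PySem.Chars.replace (PySem.Chars.lower str_2.toList) [' '] []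
  if s1.length ≠ s2.length then false
  else
    pvCmpLoop (PySem.List.sorted s1 (fun x => x) false)
              (PySem.List.sorted s2 (fun x => x) false)

-- ===== PORT B =====
-- counts = {}; for ch in str_1.lower(): if ch != ' ': counts[ch] = counts.get(ch,0)+1
--              for ch in str_2.lower(): if ch != ' ': counts[ch] = counts.get(ch,0)-1
-- return all(v == 0 for v in counts.values())
def is_permutation_one_alt (str_1 : String) (str_2 : String) : Bool :=
  let counts : PySem.Dict Char Int := PySem.Dict.empty
  let counts := (PySem.Chars.lower str_1.toList).foldl
    (fun d ch => if ch ≠ ' ' then d.insert ch (d.getD ch 0 + 1) else d) counts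
  let counts := (PySem.Chars.lower str_2.toList).foldl
    (fun d ch => if ch ≠ ' ' then d.insert ch (d.getD ch 0 - 1) else d) counts
  counts.values.all (fun v => v == 0)

-- ===== PRECONDITION & SPEC =====
def Spec_is_permutation_one (str_1 : String) (str_2 : String) (out : Bool) : Prop := out = is_permutation_one_alt str_1 str_2
instance (str_1 : String) (str_2 : String) (out : Bool) : Decidable (Spec_is_permutation_one str_1 str_2 out) := by unfold Spec_is_permutation_one; infer_instance

-- ===== CLAIM (what is proved, stated in full; the proofs are below) =====
def Claim_equal_is_permutation_one : Prop := ∀ (str_1 : String) (str_2 : String), Dom_is_permutation_one str_1 str_2 → Spec_is_permutation_one str_1 str_2 (is_permutation_one str_1 str_2)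

-- ===== LEMMAS AND PROOFS =====

-- replacing the single character ' ' by the empty string is filtering it out
theorem pvReplaceSpace_go (fuel : Nat) : ∀ (l acc : List Char), l.length ≤ fuel →
    PySem.Chars.replace.go [' '] [] fuel l acc = acc.reverse ++ l.filter (· ≠ ' ') := by
  induction fuel with
  | zero =>
    intro l acc h
    have : l = [] := List.eq_nil_of_length_eq_zero (Nat.le_zero.mp h)
    subst this; simp [PySem.Chars.replace.go]
  | succ n ih =>
    intro l acc h
    cases l with
    | nil => simp [PySem.Chars.replace.go]
    | cons c t =>
      simp only [PySem.Chars.replace.go, List.isPrefixOf, List.filter_cons]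
      by_cases hc : c = ' '
      · subst hc
        simp only [BEq.refl, Bool.true_and, if_true, List.length_cons, List.length_nil, List.drop_succ_cons,
          List.drop_zero, List.reverse_nil, List.nil_append]
        rw [ih t acc (by simpa using h)]
        simp
      · rw [if_neg (by simp [Ne.symm hc])]
        rw [ih t (c :: acc) (by simpa using h)]
        simp [hc]

theorem pvReplaceSpace (cs : List Char) :
    PySem.Chars.replace cs [' '] [] = cs.filter (· ≠ ' ') := by
  simp only [PySem.Chars.replace, List.isEmpty_cons, Bool.false_eq_true, if_false]
  simpa using pvReplaceSpace_go cs.length cs [] le_rfl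

-- A's index loop on equal-length lists succeeds exactly on equal lists
theorem pvCmpLoop_iff_eq : ∀ (xs ys : List Char), xs.length = ys.length →
    (pvCmpLoop xs ys = true ↔ xs = ys) := by
  intro xs
  induction xs with
  | nil => intro ys h; cases ys <;> simp_all [pvCmpLoop]
  | cons a as ih =>
    intro ys h
    cases ys with
    | nil => simp at h
    | cons b bs =>
      simp only [pvCmpLoop]
      by_cases hab : a = b
      · subst hab
        simp only [List.length_cons, Nat.add_right_cancel_iff] at h
        simp [ih bs h]
      · simp [hab]

-- the decrement loop: each step subtracts one from the key's tally
theorem pvGetD_foldl_insert_sub_one (l : List Char) : ∀ (d : PySem.Dict Char Int) (v : Char),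
    (l.foldl (fun d x => d.insert x (d.getD x 0 - 1)) d).getD v 0 = d.getD v 0 - l.count v := by
  induction l with
  | nil => intro d v; simp
  | cons c t ih =>
    intro d v
    simp only [List.foldl_cons, List.count_cons, ih, PySem.Dict.getD_insert]
    by_cases hvc : v = c
    · subst hvc; simp; omega
    · have : (c == v) = false := by simp [Ne.symm hvc]
      simp [hvc, this]

-- B's boolean is exactly "the two filtered lists have equal counts everywhere"
theorem pvAlt_iff (str_1 str_2 : String) :
    (is_permutation_one_alt str_1 str_2 = true) ↔
      ∀ c : Char, ((PySem.Chars.lower str_1.toList).filter (· ≠ ' ')).count c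
          = ((PySem.Chars.lower str_2.toList).filter (· ≠ ' ')).count c := by
  unfold is_permutation_one_alt
  set l1 := PySem.Chars.lower str_1.toList with hl1
  set l2 := PySem.Chars.lower str_2.toList with hl2
  -- pull the 'if ch != ' '' guard out of each loop as a filter
  have hfilt : ∀ (l : List Char) (d : PySem.Dict Char Int) (f : PySem.Dict Char Int → Char → Int),
      l.foldl (fun d ch => if ch ≠ ' ' then d.insert ch (f d ch) else d) d
        = (l.filter (· ≠ ' ')).foldl (fun d ch => d.insert ch (f d ch)) d := by
    intro l d f
    rw [List.foldl_filter]
    apply PySem.List.foldl_congr_mem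
    intro d' c _
    by_cases hc : c = ' ' <;> simp [hc]
  simp only [hfilt]
  set f1 := l1.filter (· ≠ ' ') with hf1
  set f2 := l2.filter (· ≠ ' ') with hf2
  set d : PySem.Dict Char Int :=
    f2.foldl (fun d x => d.insert x (d.getD x 0 - 1))
      (f1.foldl (fun d x => d.insert x (d.getD x 0 + 1)) PySem.Dict.empty) with hd
  have hget : ∀ c, d.getD c 0 = (f1.count c : Int) - f2.count c := by
    intro c
    rw [hd, pvGetD_foldl_insert_sub_one, PySem.Dict.getD_foldl_insert_add_one]
    simp
  have hnodup : d.keys.Nodup := by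
    rw [hd]
    exact PySem.Dict.nodup_keys_foldl_insert _ _ _
      (PySem.Dict.nodup_keys_foldl_insert _ _ _ PySem.Dict.nodup_keys_empty)
  have hkeys : ∀ c, c ∈ d.keys ↔ c ∈ f1 ∨ c ∈ f2 := by
    intro c
    rw [hd, PySem.Dict.keys_foldl_insert, PySem.Dict.keys_foldl_insert]
    simp [PySem.Set.mem_update, PySem.Dict.keys_empty]
  rw [PySem.Dict.values_eq_map_keys d hnodup 0]
  simp only [List.all_map, List.all_eq_true, Function.comp, beq_iff_eq]
  constructor
  · intro h c
    by_cases hck : c ∈ d.keys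
    · have := h c hck
      rw [hget c] at this
      omega
    · rw [hkeys] at hck
      push Not at hck
      rw [List.count_eq_zero.mpr hck.1, List.count_eq_zero.mpr hck.2]
  · intro h c _
    rw [hget c]
    have := h c
    omega

-- A's boolean is the same statement, via sortedness
theorem pvA_iff (str_1 str_2 : String) :
    (is_permutation_one str_1 str_2 = true) ↔
      ((PySem.Chars.lower str_1.toList).filter (· ≠ ' ')).Perm
        ((PySem.Chars.lower str_2.toList).filter (· ≠ ' ')) := by
  unfold is_permutation_one
  rw [pvReplaceSpace, pvReplaceSpace]
  set f1 := (PySem.Chars.lower str_1.toList).filter (· ≠ ' ')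
  set f2 := (PySem.Chars.lower str_2.toList).filter (· ≠ ' ')
  by_cases hlen : f1.length = f2.length
  · simp only [hlen, ne_eq, not_true_eq_false, if_false]
    rw [pvCmpLoop_iff_eq _ _ (by rw [PySem.List.length_sorted, PySem.List.length_sorted, hlen])]
    exact PySem.List.sorted_id_eq_sorted_id_iff_perm f1 f2
  · simp only [ne_eq, hlen, not_false_iff, if_true, Bool.false_eq_true, false_iff]
    exact fun h => hlen h.length_eq

-- ===== VERDICT (by name: the statement is the Claim_ definition above) =====
theorem is_permutation_one_spec : Claim_equal_is_permutation_one := by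
  intro str_1 str_2 _
  unfold Spec_is_permutation_one
  rw [Bool.eq_iff_iff, pvA_iff, pvAlt_iff]
  exact ⟨fun h c => h.count_eq c, fun h => List.perm_iff_count.mpr h⟩
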